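-- pv_equiv track=rewrite | github.com/martinlackner/shortlisting | shortlisting.py | compute_firstmajority
-- ===== SOURCE A (Python) =====
-- def compute_firstmajority(scores):
--     """Returns the list of winning committees
--     according to the First Majority rule"""
--     ordered_cands = sorted(range(len(scores)), key=lambda x: scores[x], reverse=True)
--     firstsum = 0
--     committee = []
--     for c in ordered_cands:
--         committee.append(c)
--         firstsum += scores[c]
--         if firstsum > sum(scores) // 2:
--             break
--
--     return sorted(committee)
-- ===== SOURCE B (Python) =====
-- def compute_firstmajority(scores):
--     """Returns the list of winning committees
--     according to the First Majority rule"""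
--     total = sum(scores)
--     remaining = list(range(len(scores)))
--     committee = []
--     firstsum = 0
--     while remaining:
--         best = max(remaining, key=lambda i: scores[i])
--         remaining.remove(best)
--         committee.append(best)
--         firstsum += scores[best]
--         if 2 * firstsum > total:
--             break
--     return sorted(committee)
-- ===== Notes on version B (the rewrite author's own statement) =====
-- stated objective: alternative
-- what changed: A sorts all candidate indices descending (stable sort) and walks the prefix, recomputing sum(scores)//2 every iteration; B never sorts for ordering: it computes the total once and repeatedly extracts the max-score candidate (selection) from the remaining index list, stopping at strict majority 2*firstsum > total.
import Mathlib
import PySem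

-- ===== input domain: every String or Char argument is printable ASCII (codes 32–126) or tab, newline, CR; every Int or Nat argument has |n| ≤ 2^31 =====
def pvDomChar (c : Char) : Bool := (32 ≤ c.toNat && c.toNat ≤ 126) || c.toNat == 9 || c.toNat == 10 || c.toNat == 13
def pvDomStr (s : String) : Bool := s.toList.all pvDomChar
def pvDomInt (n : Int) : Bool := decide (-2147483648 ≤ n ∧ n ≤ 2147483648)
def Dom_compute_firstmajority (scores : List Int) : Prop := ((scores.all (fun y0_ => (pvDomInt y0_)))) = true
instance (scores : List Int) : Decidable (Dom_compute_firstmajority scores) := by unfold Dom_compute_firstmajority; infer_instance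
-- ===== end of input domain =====

-- B replaces A's sort-then-scan (stable sort of all indices, then a prefix walk) by
-- selection: repeatedly extract the max-score candidate from the remaining index list,
-- stopping at strict majority 2*firstsum > total; no ordering sort is performed.

-- ===== PORT A =====
-- A's for-loop over the descending-sorted candidate list, with early break; the
-- threshold sum(scores) // 2 is recomputed at each test, as in the Python.
def cfmLoopA (scores : List Int) (cands : List Int) (firstsum : Int)
    (committee : List Int) : List Int :=
  match cands with
  | [] => committee
  | c :: rest =>
    let committee' := committee ++ [c]
    let firstsum' := firstsum + (PySem.List.pyGet? scores c).getD 0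
    if firstsum' > PySem.Int.floordiv scores.sum 2 then committee'
    else cfmLoopA scores rest firstsum' committee'

def compute_firstmajority (scores : List Int) : List Int :=
  let ordered_cands := PySem.List.sorted (PySem.List.pyRange 0 scores.length 1)
      (fun x => (PySem.List.pyGet? scores x).getD 0) true
  PySem.List.sorted (cfmLoopA scores ordered_cands 0 []) (fun x => x) false

-- ===== PORT B =====
-- B's while-loop: Python's max(remaining, key=…) is PySem.List.max? (first extremal),
-- remaining.remove(best) is PySem.List.remove? (best always present, so .getD [] is exact).
def cfmLoopB (scores : List Int) (rem : List Int) (total : Int) (fs : Int)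
    (committee : List Int) : List Int :=
  match hm : PySem.List.max? rem (fun i => (PySem.List.pyGet? scores i).getD 0) with
  | none => committee
  | some best =>
    let rem' := (PySem.List.remove? rem best).getD []
    let committee' := committee ++ [best]
    let fs' := fs + (PySem.List.pyGet? scores best).getD 0
    if 2 * fs' > total then committee'
    else cfmLoopB scores rem' total fs' committee'
termination_by rem.length
decreasing_by
  have hb : best ∈ rem := PySem.List.max?_mem hm
  simp only [PySem.List.remove?_eq_some_erase rem best hb, Option.getD_some]
  have := List.length_erase_of_mem hb
  have : 0 < rem.length := List.length_pos_of_mem hb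
  omega

def compute_firstmajority_alt (scores : List Int) : List Int :=
  let total := scores.sum
  let remaining := PySem.List.pyRange 0 scores.length 1
  PySem.List.sorted (cfmLoopB scores remaining total 0 []) (fun x => x) false

-- ===== PRECONDITION & SPEC =====
def Spec_compute_firstmajority (scores : List Int) (out : List Int) : Prop := out = compute_firstmajority_alt scores
instance (scores : List Int) (out : List Int) : Decidable (Spec_compute_firstmajority scores out) := by unfold Spec_compute_firstmajority; infer_instance

-- ===== CLAIM (what is proved, stated in full; the proofs are below) =====
def Claim_equal_compute_firstmajority : Prop := ∀ (scores : List Int), Dom_compute_firstmajority scores → Spec_compute_firstmajority scores (compute_firstmajority scores)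

-- ===== LEMMAS AND PROOFS =====

-- The stable order of Python's sorted(…, reverse=True): higher key first, ties by
-- original (here: ascending index) position.
def cfmPrec (key : Int → Int) (a b : Int) : Prop :=
  key b < key a ∨ (key a = key b ∧ a ≤ b)

theorem cfmInsertBy_eq {α : Type} (p : α → α → Bool) (x : α) :
    ∀ l : List α, PySem.List.insertBy p x l =
      l.takeWhile (fun y => !p x y) ++ x :: l.dropWhile (fun y => !p x y) := by
  intro l
  induction l with
  | nil => rfl
  | cons y ys ih =>
    by_cases h : p x y = true
    · simp [PySem.List.insertBy, List.takeWhile, List.dropWhile, h]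
    · simp only [Bool.not_eq_true] at h
      simp [PySem.List.insertBy, List.takeWhile, List.dropWhile, h, ih]

theorem cfmInsert_pairwise (key : Int → Int) (x : Int) (acc : List Int)
    (hp : acc.Pairwise (cfmPrec key)) (hlt : ∀ y ∈ acc, y < x) :
    (PySem.List.insertBy (fun a b => decide (key b < key a)) x acc).Pairwise (cfmPrec key) := by
  rw [cfmInsertBy_eq]
  have hsplit : acc = acc.takeWhile (fun y => !decide (key y < key x)) ++
      acc.dropWhile (fun y => !decide (key y < key x)) :=
    (List.takeWhile_append_dropWhile).symm
  have hptd := hsplit ▸ hp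
  rw [List.pairwise_append] at hptd
  obtain ⟨hpt, hpd, hcross⟩ := hptd
  -- every element of the dropWhile suffix has key < key x
  have hdrop : ∀ b ∈ acc.dropWhile (fun y => !decide (key y < key x)), key b < key x := by
    intro b hb
    cases hd : acc.dropWhile (fun y => !decide (key y < key x)) with
    | nil => rw [hd] at hb; simp at hb
    | cons h ts =>
      rw [hd] at hb
      have hpd' : (h :: ts).Pairwise (cfmPrec key) := hd ▸ hpd
      have hhead : key h < key x := by
        have h0 := List.head?_dropWhile_not (fun y => !decide (key y < key x)) acc
        rw [hd] at h0; simpa using h0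
      rcases List.mem_cons.mp hb with rfl | hb'
      · exact hhead
      · rcases (List.pairwise_cons.mp hpd').1 b hb' with h1 | h2
        · exact lt_trans h1 hhead
        · exact h2.1 ▸ hhead
  rw [List.pairwise_append]
  refine ⟨hpt, ?_, ?_⟩
  · rw [List.pairwise_cons]
    exact ⟨fun b hb => Or.inl (hdrop b hb), hpd⟩
  · intro a ha b hb
    have hax : a < x := hlt a ((List.takeWhile_sublist _).subset ha)
    have hkxa : key x ≤ key a := by
      have hpa := List.mem_takeWhile_imp ha
      simp only [Bool.not_eq_eq_eq_not, Bool.not_true, decide_eq_false_iff_not] at hpa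
      exact le_of_not_gt hpa
    rcases List.mem_cons.mp hb with rfl | hb'
    · rcases lt_or_eq_of_le hkxa with h1 | h1
      · exact Or.inl h1
      · exact Or.inr ⟨h1.symm, le_of_lt hax⟩
    · exact hcross a ha b hb'

-- Python's stable reverse sort of an ascending list is Pairwise cfmPrec.
theorem cfmSortedAux (key : Int → Int) :
    ∀ (l acc : List Int), l.Pairwise (· < ·) → acc.Pairwise (cfmPrec key) →
      (∀ y ∈ acc, ∀ z ∈ l, y < z) →
      (l.foldl (fun acc x =>
        PySem.List.insertBy (fun a b => decide (key b < key a)) x acc) acc).Pairwise (cfmPrec key) := by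
  intro l
  induction l with
  | nil => intro acc _ hacc _; simpa using hacc
  | cons x xs ih =>
    intro acc hl hacc hcross
    simp only [List.foldl_cons]
    apply ih
    · exact (List.pairwise_cons.mp hl).2
    · exact cfmInsert_pairwise key x acc hacc (fun y hy => hcross y hy x List.mem_cons_self)
    · intro y hy z hz
      rcases (PySem.List.mem_insertBy _ _ _ _).mp hy with rfl | hy'
      · exact (List.pairwise_cons.mp hl).1 z hz
      · exact hcross y hy' z (List.mem_cons_of_mem _ hz)

theorem cfmSorted_pairwise (key : Int → Int) (l : List Int) (hl : l.Pairwise (· < ·)) :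
    (PySem.List.sorted l key true).Pairwise (cfmPrec key) := by
  rw [PySem.List.sorted_rev_eq_foldl_insertBy]
  exact cfmSortedAux key l [] hl (by simp) (by simp)

-- Characterisation of the element B's max() picks from an ascending list.
def cfmFirstMax (key : Int → Int) (l : List Int) (m : Int) : Prop :=
  m ∈ l ∧ (∀ y ∈ l, key y ≤ key m) ∧ (∀ y ∈ l, key y = key m → m ≤ y)

theorem cfmMax?_cons₂ (key : Int → Int) (m x : Int) (xs : List Int) :
    PySem.List.max? (m :: x :: xs) key =
      PySem.List.max? ((if key m < key x then x else m) :: xs) key := by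
  simp only [PySem.List.max?, List.foldl_cons]
  split <;> rfl

theorem cfmMax?_single (key : Int → Int) (m : Int) :
    PySem.List.max? [m] key = some m := by
  simp [PySem.List.max?]

theorem cfmMax?_aux (key : Int → Int) :
    ∀ (t : List Int) (m : Int), t.Pairwise (· < ·) → (∀ z ∈ t, m < z) →
      ∃ m', PySem.List.max? (m :: t) key = some m' ∧
        (m' = m ∨ m' ∈ t) ∧ (∀ y ∈ m :: t, key y ≤ key m') ∧
        (∀ y ∈ m :: t, key y = key m' → m' ≤ y) := by
  intro t
  induction t with
  | nil =>
    intro m _ _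
    exact ⟨m, cfmMax?_single key m, Or.inl rfl, by simp, by simp⟩
  | cons x xs ih =>
    intro m hp hz
    rw [cfmMax?_cons₂]
    by_cases hc : key m < key x
    · rw [if_pos hc]
      obtain ⟨m', hr, hmem, hmax, htie⟩ := ih x (List.pairwise_cons.mp hp).2
        (fun z hz' => (List.pairwise_cons.mp hp).1 z hz')
      refine ⟨m', hr, ?_, ?_, ?_⟩
      · rcases hmem with rfl | h
        · exact Or.inr List.mem_cons_self
        · exact Or.inr (List.mem_cons_of_mem _ h)
      · intro y hy
        rcases List.mem_cons.mp hy with rfl | hy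
        · exact le_of_lt (lt_of_lt_of_le hc (hmax x List.mem_cons_self))
        · exact hmax y hy
      · intro y hy hk
        rcases List.mem_cons.mp hy with rfl | hy
        · exact absurd hk (ne_of_lt (lt_of_lt_of_le hc (hmax x List.mem_cons_self)))
        · exact htie y hy hk
    · rw [if_neg hc]
      have hxz : ∀ z ∈ xs, m < z := fun z hz' =>
        lt_trans (hz x List.mem_cons_self) ((List.pairwise_cons.mp hp).1 z hz')
      obtain ⟨m', hr, hmem, hmax, htie⟩ := ih m (List.pairwise_cons.mp hp).2 hxz
      have hkxm : key x ≤ key m := le_of_not_gt hc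
      have hkm : key m ≤ key m' := hmax m List.mem_cons_self
      refine ⟨m', hr, ?_, ?_, ?_⟩
      · rcases hmem with rfl | h
        · exact Or.inl rfl
        · exact Or.inr (List.mem_cons_of_mem _ h)
      · intro y hy
        rcases List.mem_cons.mp hy with rfl | hy
        · exact hkm
        · rcases List.mem_cons.mp hy with rfl | hy
          · exact le_trans hkxm hkm
          · exact hmax y (List.mem_cons_of_mem _ hy)
      · intro y hy hk
        rcases List.mem_cons.mp hy with rfl | hy
        · exact htie y List.mem_cons_self hk
        · rcases List.mem_cons.mp hy with rfl | hy
          · -- tie with the skipped element: then key m = key m' and m' ≤ m < y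
            have hkm' : key m = key m' := le_antisymm hkm (hk ▸ hkxm)
            exact le_of_lt (lt_of_le_of_lt (htie m List.mem_cons_self hkm')
              (hz y List.mem_cons_self))
          · exact htie y (List.mem_cons_of_mem _ hy) hk

theorem cfmMax?_firstMax (key : Int → Int) (l : List Int) (hl : l.Pairwise (· < ·))
    (m : Int) (hm : PySem.List.max? l key = some m) : cfmFirstMax key l m := by
  cases l with
  | nil => simp [PySem.List.max?] at hm
  | cons x xs =>
    obtain ⟨m', hr, hmem, hmax, htie⟩ := cfmMax?_aux key xs x (List.pairwise_cons.mp hl).2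
      (fun z hz => (List.pairwise_cons.mp hl).1 z hz)
    rw [hr] at hm
    injection hm with hm; subst hm
    refine ⟨?_, hmax, htie⟩
    rcases hmem with rfl | h
    · exact List.mem_cons_self
    · exact List.mem_cons_of_mem _ h

-- The head of the stable reverse sort also satisfies cfmFirstMax.
theorem cfmHead_firstMax (key : Int → Int) (rem : List Int) (h : Int) (t : List Int)
    (hasc : rem.Pairwise (· < ·))
    (hs : PySem.List.sorted rem key true = h :: t) : cfmFirstMax key rem h := by
  have hperm : (h :: t).Perm rem := hs ▸ PySem.List.sorted_perm rem key true
  have hpw : (h :: t).Pairwise (cfmPrec key) := hs ▸ cfmSorted_pairwise key rem hasc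
  have hmem : h ∈ rem := hperm.mem_iff.mp List.mem_cons_self
  refine ⟨hmem, ?_, ?_⟩
  · intro y hy
    rcases List.mem_cons.mp (hperm.mem_iff.mpr hy) with rfl | hy'
    · exact le_refl _
    · rcases (List.pairwise_cons.mp hpw).1 y hy' with h1 | h2
      · exact le_of_lt h1
      · exact le_of_eq h2.1.symm
  · intro y hy hk
    rcases List.mem_cons.mp (hperm.mem_iff.mpr hy) with rfl | hy'
    · exact le_refl _
    · rcases (List.pairwise_cons.mp hpw).1 y hy' with h1 | h2
      · exact absurd hk (ne_of_lt h1)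
      · exact h2.2

theorem cfmFirstMax_unique (key : Int → Int) (l : List Int) (m1 m2 : Int)
    (h1 : cfmFirstMax key l m1) (h2 : cfmFirstMax key l m2) : m1 = m2 := by
  obtain ⟨hm1, hmax1, htie1⟩ := h1
  obtain ⟨hm2, hmax2, htie2⟩ := h2
  have hk : key m1 = key m2 := le_antisymm (hmax2 m1 hm1) (hmax1 m2 hm2)
  exact le_antisymm (htie1 m2 hm2 hk.symm) (htie2 m1 hm1 hk)

-- Peeling the head of the stable reverse sort: B's max() picks exactly it, and the
-- sort of the remaining candidates is exactly the tail.
theorem cfmSorted_cons_elim (key : Int → Int) (rem : List Int) (h : Int) (t : List Int)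
    (hasc : rem.Pairwise (· < ·))
    (hs : PySem.List.sorted rem key true = h :: t) :
    PySem.List.max? rem key = some h ∧ h ∈ rem ∧
      PySem.List.sorted (rem.erase h) key true = t := by
  have hhead := cfmHead_firstMax key rem h t hasc hs
  have hmem : h ∈ rem := hhead.1
  constructor
  · cases hmx : PySem.List.max? rem key with
    | none =>
      rw [PySem.List.max?_eq_none_iff] at hmx
      subst hmx; exact absurd hmem (List.not_mem_nil)
    | some m =>
      have := cfmFirstMax_unique key rem m h (cfmMax?_firstMax key rem hasc m hmx) hhead
      rw [this]
  refine ⟨hmem, ?_⟩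
  -- tail = sorted of the erased list, by uniqueness of Pairwise-cfmPrec arrangements
  have hperm : (h :: t).Perm rem := hs ▸ PySem.List.sorted_perm rem key true
  have hpw : (h :: t).Pairwise (cfmPrec key) := hs ▸ cfmSorted_pairwise key rem hasc
  have hascE : (rem.erase h).Pairwise (· < ·) := hasc.sublist (List.erase_sublist)
  have hpermE : (PySem.List.sorted (rem.erase h) key true).Perm t := by
    have h1 : (PySem.List.sorted (rem.erase h) key true).Perm (rem.erase h) :=
      PySem.List.sorted_perm _ key true
    have h2 : (rem.erase h).Perm ((h :: t).erase h) := (hperm.erase h).symm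
    have h3 : (h :: t).erase h = t := by simp
    exact h1.trans (h3 ▸ h2)
  have hpwE : (PySem.List.sorted (rem.erase h) key true).Pairwise (cfmPrec key) :=
    cfmSorted_pairwise key (rem.erase h) hascE
  have hpwT : t.Pairwise (cfmPrec key) := (List.pairwise_cons.mp hpw).2
  refine List.eq_of_perm_of_sorted ?_ hpwE hpwT hpermE
  intro a b _ _ hab hba
  rcases hab with h1 | h1 <;> rcases hba with h2 | h2
  · exact absurd h1 (not_lt_of_gt h2)
  · exact absurd h1 (h2.1 ▸ lt_irrefl _)
  · exact absurd h2 (h1.1 ▸ lt_irrefl _)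
  · exact le_antisymm h1.2 h2.2

theorem cfmThreshold (total f : Int) : (2 * f > total) ↔ (f > PySem.Int.floordiv total 2) := by
  rw [PySem.Int.floordiv, Int.fdiv_eq_ediv]; norm_num; omega

-- The two loops compute the same committee: A walks the stable reverse sort of the
-- remaining ascending candidate list; B extracts its head with max() at each step.
theorem cfmLoopAB (scores : List Int) :
    ∀ (n : ℕ) (rem : List Int), rem.length ≤ n → rem.Pairwise (· < ·) →
      ∀ (fs : Int) (acc : List Int),
        cfmLoopA scores
          (PySem.List.sorted rem (fun i => (PySem.List.pyGet? scores i).getD 0) true) fs acc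
        = cfmLoopB scores rem scores.sum fs acc := by
  intro n
  induction n with
  | zero =>
    intro rem hn _ fs acc
    have : rem = [] := List.length_eq_zero_iff.mp (Nat.le_zero.mp hn)
    subst this
    rw [cfmLoopB]
    simp [cfmLoopA, PySem.List.sorted, PySem.List.max?]
  | succ n ih =>
    intro rem hn hasc fs acc
    cases hs : PySem.List.sorted rem (fun i => (PySem.List.pyGet? scores i).getD 0) true with
    | nil =>
      have : rem = [] := (PySem.List.sorted_eq_nil_iff _ _ _).mp hs
      subst this
      rw [cfmLoopB]
      simp [cfmLoopA, PySem.List.max?]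
    | cons h t =>
      obtain ⟨hmx, hmem, hrest⟩ := cfmSorted_cons_elim _ rem h t hasc hs
      rw [cfmLoopB]
      split
      · rename_i heq
        rw [hmx] at heq
        exact absurd heq (by simp)
      · rename_i best heq
        rw [hmx] at heq
        injection heq with heq
        subst heq
        rw [PySem.List.remove?_eq_some_erase rem h hmem, Option.getD_some]
        simp only [cfmLoopA]
        by_cases hcond : fs + (PySem.List.pyGet? scores h).getD 0 >
            PySem.Int.floordiv scores.sum 2
        · rw [if_pos hcond, if_pos ((cfmThreshold _ _).mpr hcond)]
        · rw [if_neg hcond, if_neg (fun hc => hcond ((cfmThreshold _ _).mp hc))]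
          have hlen : (rem.erase h).length ≤ n := by
            have := List.length_erase_of_mem hmem
            have := List.length_pos_of_mem hmem
            omega
          have hascE : (rem.erase h).Pairwise (· < ·) := hasc.sublist (List.erase_sublist)
          rw [← hrest]
          exact ih (rem.erase h) hlen hascE _ _

-- ===== VERDICT (by name: the statement is the Claim_ definition above) =====
theorem compute_firstmajority_spec : Claim_equal_compute_firstmajority := by
  intro scores _
  unfold Spec_compute_firstmajority compute_firstmajority compute_firstmajority_alt
  exact congrArg (fun l => PySem.List.sorted l (fun x => x) false)
    (cfmLoopAB scores (PySem.List.pyRange 0 scores.length 1).length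
      (PySem.List.pyRange 0 scores.length 1) (le_refl _)
      (PySem.List.pairwise_lt_pyRange_one 0 scores.length) 0 [])
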